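-- pv_equiv track=rewrite | github.com/shilongdai/verySimpleContact | contact.py | get_equivalence_expressions
-- ===== SOURCE A (Python) =====
-- def get_equivalence_expressions(strings):
-- 	"""
-- 	get a list of strings in the format of name=some expression from a list of strings. It is expected that a whole string is split by space to form the input string list
-- 	:param strings: the input string list. It is assumed to be once a whole string with space delimiter
-- 	:return: a list of strings in the format name=some expression
-- 	"""
--
-- 	result = []
-- 	equal_indexes = []
--
-- 	# identify the index of all segments with equal sign
-- 	for counter, value in enumerate(strings):
-- 		if '=' in value:
-- 			equal_indexes.append(counter)
--
-- 	if len(equal_indexes) == 0: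
-- 		return result
--
-- 	# regroup the original lists into segments seperated by the equal sign indexes
-- 	equal_indexes.append(len(strings))
-- 	last_index = 0
-- 	for i in equal_indexes:
-- 		result.append(" ".join(strings[last_index:i]))
-- 		last_index = i
-- 	result.pop(0)
-- 	return result
-- ===== SOURCE B (Python) =====
-- def get_equivalence_expressions(strings):
-- 	"""Single stateful pass: open a group at each '='-token, collect following tokens, join with spaces."""
-- 	result = []
-- 	current = None
-- 	for value in strings:
-- 		if '=' in value:
-- 			if current is not None:
-- 				result.append(" ".join(current))
-- 			current = [value]
-- 		elif current is not None:
-- 			current.append(value)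
-- 	if current is not None:
-- 		result.append(" ".join(current))
-- 	return result
-- ===== Notes on version B (the rewrite author's own statement) =====
-- stated objective: simpler
-- what changed: Replaced A's two-pass scheme (collect all '='-token indices with a sentinel length entry, then re-slice the list between consecutive indices and pop the leading segment) by one stateful pass that flushes a current-group accumulator at each '='-token; no index list, no slicing, no pop.
import Mathlib
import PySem

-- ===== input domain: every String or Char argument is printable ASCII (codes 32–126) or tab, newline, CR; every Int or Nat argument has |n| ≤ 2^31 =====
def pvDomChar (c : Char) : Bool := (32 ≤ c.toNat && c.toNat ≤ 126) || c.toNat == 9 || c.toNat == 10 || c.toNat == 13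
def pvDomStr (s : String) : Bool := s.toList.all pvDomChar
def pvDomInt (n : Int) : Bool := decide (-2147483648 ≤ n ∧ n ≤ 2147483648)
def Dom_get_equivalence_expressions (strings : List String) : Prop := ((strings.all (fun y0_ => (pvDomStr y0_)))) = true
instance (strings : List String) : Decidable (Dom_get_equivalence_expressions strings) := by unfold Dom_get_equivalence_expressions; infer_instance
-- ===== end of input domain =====

-- B replaces A's two-pass index-collection-then-slice scheme by one stateful pass with a
-- current-group accumulator (objective: simpler; same O(n) cost, no speed claim).

-- ===== PORT A =====
-- literal port of A: collect '='-indices via enumerate, append len, slice between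
-- consecutive indices, pop the leading segment (the pop?-none branch is unreachable:
-- the equal_indexes list is nonempty there, so result is nonempty).
def get_equivalence_expressions (strings : List String) : List String :=
  let result : List String := []
  let equal_indexes : List Int := []
  let equal_indexes := (PySem.List.enumerate strings 0).foldl
    (fun acc cv => if PySem.Str.isIn "=" cv.2 then acc ++ [cv.1] else acc) equal_indexes
  if equal_indexes.length = 0 then result
  else
    let equal_indexes := equal_indexes ++ [(strings.length : Int)]
    let st := equal_indexes.foldl
      (fun (s : List String × Int) i =>
        (s.1 ++ [PySem.Str.join " " (PySem.List.slice strings (some s.2) (some i))], i))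
      (result, (0 : Int))
    match PySem.List.pop? st.1 0 with
    | some (_, rest) => rest
    | none => []

-- ===== PORT B =====
-- loop body of Source B: on an '='-token flush the open group and start a new one, otherwise
-- extend the open group (tokens before the first '='-token are dropped: state none)
def altStep (s : List String × Option (List String)) (value : String) :
    List String × Option (List String) :=
  if PySem.Str.isIn "=" value then
    ((match s.2 with
      | some cur => s.1 ++ [PySem.Str.join " " cur]
      | none => s.1), some [value])
  else
    match s.2 with
    | some cur => (s.1, some (cur ++ [value]))
    | none => s

-- final flush of Source B
def altFin (s : List String × Option (List String)) : List String :=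
  match s.2 with
  | some cur => s.1 ++ [PySem.Str.join " " cur]
  | none => s.1

def get_equivalence_expressions_alt (strings : List String) : List String :=
  altFin (strings.foldl altStep ([], none))

-- ===== PRECONDITION & SPEC =====
def Spec_get_equivalence_expressions (strings : List String) (out : List String) : Prop := out = get_equivalence_expressions_alt strings
instance (strings : List String) (out : List String) : Decidable (Spec_get_equivalence_expressions strings out) := by unfold Spec_get_equivalence_expressions; infer_instance

-- ===== CLAIM (what is proved, stated in full; the proofs are below) =====
def Claim_equal_get_equivalence_expressions : Prop := ∀ (strings : List String), Dom_get_equivalence_expressions strings → Spec_get_equivalence_expressions strings (get_equivalence_expressions strings)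

-- ===== LEMMAS AND PROOFS =====

-- common reference function: the list of groups, one per '='-token, each joined with " "
def G : List String → List String
  | [] => []
  | x :: xs =>
    if PySem.Str.isIn "=" x then
      PySem.Str.join " " (x :: xs.takeWhile (fun v => !PySem.Str.isIn "=" v)) :: G xs
    else G xs

-- the '='-index list of A's first loop, as a structural recursion
def Idx : List String → List Int
  | [] => []
  | x :: xs =>
    if PySem.Str.isIn "=" x then 0 :: (Idx xs).map (· + 1) else (Idx xs).map (· + 1)

-- the segments A's second loop produces from a given start index and index list
def segs (strings : List String) (last : Int) : List Int → List String
  | [] => []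
  | i :: is =>
    PySem.Str.join " " (PySem.List.slice strings (some last) (some i)) :: segs strings i is

theorem Idx_nonneg : ∀ (xs : List String), ∀ j ∈ Idx xs, 0 ≤ j := by
  intro xs
  induction xs with
  | nil => simp [Idx]
  | cons x xs ih =>
    intro j hj
    simp only [Idx] at hj
    split at hj
    · rcases List.mem_cons.mp hj with h | h
      · omega
      · obtain ⟨a, ha, rfl⟩ := List.mem_map.mp h; have := ih a ha; omega
    · obtain ⟨a, ha, rfl⟩ := List.mem_map.mp hj; have := ih a ha; omega

theorem Idx_nil_G {xs : List String} (h : Idx xs = []) : G xs = [] := by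
  induction xs with
  | nil => rfl
  | cons x xs ih =>
    simp only [Idx] at h
    by_cases hx : PySem.Str.isIn "=" x
    · have hC : PySem.Chars.isIn ['='] x.toList = true := by simpa using hx
      simp [hC] at h
    · have hC : PySem.Chars.isIn ['='] x.toList = false := by simpa using hx
      rw [if_neg hx] at h
      have : Idx xs = [] := by simpa using h
      simpa [G, hC] using ih this

-- A's first loop computes Idx (shifted by the enumeration start)
theorem enum_fold_eq_Idx (xs : List String) : ∀ (s : Int) (acc : List Int),
    (PySem.List.enumerate xs s).foldl
      (fun acc cv => if PySem.Str.isIn "=" cv.2 then acc ++ [cv.1] else acc) acc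
    = acc ++ (Idx xs).map (· + s) := by
  induction xs with
  | nil => intro s acc; simp [PySem.List.enumerate_nil, Idx]
  | cons x xs ih =>
    intro s acc
    rw [PySem.List.enumerate_cons, List.foldl_cons]
    have hcomp : ((· + s) ∘ (· + 1) : Int → Int) = (· + (s + 1)) := by
      funext a; simp; ring
    by_cases hx : PySem.Str.isIn "=" x
    · have hC : PySem.Chars.isIn ['='] x.toList = true := by simpa using hx
      simp only [hx, if_true, ih (s + 1), Idx, List.map_cons, List.map_map, hcomp]
      simp
    · have hC : PySem.Chars.isIn ['='] x.toList = false := by simpa using hx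
      simp only [hx, if_false, ih (s + 1), Idx, Bool.false_eq_true, List.map_map, hcomp]

-- A's second loop computes segs
theorem fold_eq_segs (strings : List String) : ∀ (js : List Int) (res : List String) (last : Int),
    (js.foldl
      (fun (s : List String × Int) i =>
        (s.1 ++ [PySem.Str.join " " (PySem.List.slice strings (some s.2) (some i))], i))
      (res, last)).1 = res ++ segs strings last js := by
  intro js
  induction js with
  | nil => intro res last; simp [segs]
  | cons j js ih => intro res last; simp [List.foldl_cons, ih, segs]

theorem slice_shift {α : Type} (x : α) (xs : List α) {a b : Int} (ha : 0 ≤ a) (hb : 0 ≤ b) :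
    PySem.List.slice (x :: xs) (some (a + 1)) (some (b + 1))
      = PySem.List.slice xs (some a) (some b) := by
  rw [PySem.List.slice_toNat _ (by omega) (by omega), PySem.List.slice_toNat _ ha hb]
  have h1 : (a + 1).toNat = a.toNat + 1 := by omega
  have h2 : (b + 1).toNat = b.toNat + 1 := by omega
  simp [h1, h2]

theorem segs_shift (x : String) (xs : List String) : ∀ (js : List Int) (last : Int),
    0 ≤ last → (∀ j ∈ js, 0 ≤ j) →
    segs (x :: xs) (last + 1) (js.map (· + 1)) = segs xs last js := by
  intro js
  induction js with
  | nil => intro last _ _; rfl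
  | cons j js ih =>
    intro last hl hjs
    have hj : 0 ≤ j := hjs j (by simp)
    simp only [List.map_cons, segs]
    rw [slice_shift x xs hl hj, ih j hj (fun a ha => hjs a (by simp [ha]))]

-- the head of Idx xs ++ [len] cuts off exactly the '='-free prefix
theorem first_idx (xs : List String) : ∃ j0 rest,
    Idx xs ++ [(xs.length : Int)] = j0 :: rest ∧
    xs.take j0.toNat = xs.takeWhile (fun v => !PySem.Str.isIn "=" v) := by
  induction xs with
  | nil => exact ⟨0, [], rfl, rfl⟩
  | cons x xs ih =>
    by_cases hx : PySem.Str.isIn "=" x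
    · have hC : PySem.Chars.isIn ['='] x.toList = true := by simpa using hx
      refine ⟨0, (Idx xs).map (· + 1) ++ [(xs.length : Int) + 1], ?_, ?_⟩
      · simp [Idx, hC]
      · simp [hC]
    · obtain ⟨j0, rest, heq, htake⟩ := ih
      have hj0 : 0 ≤ j0 := by
        have : j0 ∈ Idx xs ++ [(xs.length : Int)] := by rw [heq]; simp
        rcases List.mem_append.mp this with h | h
        · exact Idx_nonneg xs j0 h
        · simp at h; omega
      refine ⟨j0 + 1, rest.map (· + 1), ?_, ?_⟩
      · have hC : PySem.Chars.isIn ['='] x.toList = false := by simpa using hx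
        have : Idx (x :: xs) ++ [((x :: xs).length : Int)]
            = (Idx xs ++ [(xs.length : Int)]).map (· + 1) := by
          simp [Idx, hC]
        rw [this, heq]; simp
      · have hC : PySem.Chars.isIn ['='] x.toList = false := by simpa using hx
        have ht : (j0 + 1).toNat = j0.toNat + 1 := by omega
        simp [ht, hC, htake]

-- A's segment list is the '='-free prefix followed by G
theorem segs_eq_G : ∀ (xs : List String),
    segs xs 0 (Idx xs ++ [(xs.length : Int)])
      = PySem.Str.join " " (xs.takeWhile (fun v => !PySem.Str.isIn "=" v)) :: G xs := by
  intro xs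
  induction xs with
  | nil => rfl
  | cons x xs ih =>
    obtain ⟨j0, rest, heq, htake⟩ := first_idx xs
    have hj0 : 0 ≤ j0 := by
      have : j0 ∈ Idx xs ++ [(xs.length : Int)] := by rw [heq]; simp
      rcases List.mem_append.mp this with h | h
      · exact Idx_nonneg xs j0 h
      · simp at h; omega
    have hrest : ∀ j ∈ rest, 0 ≤ j := by
      intro j hj
      have : j ∈ Idx xs ++ [(xs.length : Int)] := by rw [heq]; simp [hj]
      rcases List.mem_append.mp this with h | h
      · exact Idx_nonneg xs j h
      · simp at h; omega
    -- slice xs [0:j0] is take j0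
    have hslice0 : PySem.List.slice xs (some 0) (some j0) = xs.take j0.toNat := by
      rw [PySem.List.slice_toNat _ le_rfl hj0]; simp
    -- from the IH, the tail of segs over xs is G xs
    have hseg : segs xs j0 rest = G xs := by
      have := ih
      rw [heq] at this
      simp only [segs, hslice0, htake] at this
      exact (List.cons.injEq _ _ _ _ ▸ this).2
    have ht1 : (j0 + 1).toNat = j0.toNat + 1 := by omega
    have hsliceC : PySem.List.slice (x :: xs) (some 0) (some (j0 + 1))
        = x :: xs.takeWhile (fun v => !PySem.Str.isIn "=" v) := by
      rw [PySem.List.slice_toNat _ le_rfl (by omega)]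
      simp [ht1, htake]
    by_cases hx : PySem.Str.isIn "=" x
    · have hC : PySem.Chars.isIn ['='] x.toList = true := by simpa using hx
      have hidx : Idx (x :: xs) ++ [((x :: xs).length : Int)]
          = 0 :: (j0 + 1) :: rest.map (· + 1) := by
        have : Idx (x :: xs) ++ [((x :: xs).length : Int)]
            = 0 :: (Idx xs ++ [(xs.length : Int)]).map (· + 1) := by
          simp [Idx, hC]
        rw [this, heq]; simp
      rw [hidx]
      simp only [segs]
      rw [hsliceC, segs_shift x xs rest j0 hj0 hrest, hseg]
      have hsl00 : PySem.List.slice (x :: xs) (some 0) (some 0) = ([] : List String) := by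
        rw [PySem.List.slice_toNat _ le_rfl le_rfl]; simp
      simp [hsl00, G, hC]
    · have hC : PySem.Chars.isIn ['='] x.toList = false := by simpa using hx
      have hidx : Idx (x :: xs) ++ [((x :: xs).length : Int)]
          = (j0 + 1) :: rest.map (· + 1) := by
        have : Idx (x :: xs) ++ [((x :: xs).length : Int)]
            = (Idx xs ++ [(xs.length : Int)]).map (· + 1) := by
          simp [Idx, hC]
        rw [this, heq]; simp
      rw [hidx]
      simp only [segs]
      rw [hsliceC, segs_shift x xs rest j0 hj0 hrest, hseg]
      simp [G, hC]

theorem A_eq_G (xs : List String) : get_equivalence_expressions xs = G xs := by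
  unfold get_equivalence_expressions
  simp only [enum_fold_eq_Idx xs 0, List.nil_append]
  have hmap : (Idx xs).map (· + (0 : Int)) = Idx xs := by simp
  rw [hmap]
  by_cases h : (Idx xs).length = 0
  · simp only [h, if_true]
    exact (Idx_nil_G (List.length_eq_zero_iff.mp h)).symm
  · simp only [h, if_false]
    rw [fold_eq_segs xs, List.nil_append, segs_eq_G xs, PySem.List.pop?_zero_cons]

-- B with an open group: the group absorbs the '='-free prefix, then G takes over
theorem alt_open : ∀ (xs res cur : List String),
    altFin (xs.foldl altStep (res, some cur))
      = res ++ PySem.Str.join " " (cur ++ xs.takeWhile (fun v => !PySem.Str.isIn "=" v)) :: G xs := by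
  intro xs
  induction xs with
  | nil => intro res cur; simp [altFin, G]
  | cons x xs ih =>
    intro res cur
    by_cases hx : PySem.Str.isIn "=" x
    · have hC : PySem.Chars.isIn ['='] x.toList = true := by simpa using hx
      simp only [List.foldl_cons, altStep, hx, if_true]
      rw [ih]
      simp [G, hC]
    · have hC : PySem.Chars.isIn ['='] x.toList = false := by simpa using hx
      simp only [List.foldl_cons, altStep]
      rw [if_neg hx, ih]
      simp [G, hC]

-- B with no open group yet: leading '='-free tokens are dropped
theorem alt_none : ∀ (xs : List String) (res : List String),
    altFin (xs.foldl altStep (res, none)) = res ++ G xs := by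
  intro xs
  induction xs with
  | nil => intro res; simp [altFin, G]
  | cons x xs ih =>
    intro res
    by_cases hx : PySem.Str.isIn "=" x
    · have hC : PySem.Chars.isIn ['='] x.toList = true := by simpa using hx
      simp only [List.foldl_cons, altStep, hx, if_true]
      rw [alt_open]
      simp [G, hC]
    · have hC : PySem.Chars.isIn ['='] x.toList = false := by simpa using hx
      simp only [List.foldl_cons, altStep]
      rw [if_neg hx]
      exact (ih res).trans (by simp [G, hC])

theorem B_eq_G (xs : List String) : get_equivalence_expressions_alt xs = G xs := by
  unfold get_equivalence_expressions_alt
  simpa using alt_none xs []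

-- ===== VERDICT (by name: the statement is the Claim_ definition above) =====
theorem get_equivalence_expressions_spec : Claim_equal_get_equivalence_expressions := by
  intro strings _
  unfold Spec_get_equivalence_expressions
  rw [A_eq_G, B_eq_G]
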